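-- pv_equiv track=rewrite | github.com/cuiyf17/Master-course | quant start/正定实习/alphafilter2700.py | alphalist_split
-- ===== SOURCE A (Python) =====
-- def alphalist_split(alphaslist, num_split = 3):
--     tmp_list = sorted(alphaslist)
--     alphadict= dict()
--     for i in range(num_split):
--         alphadict["split%d" % i] = []
--     for i, item in enumerate(tmp_list):
--         alphadict["split%d" % (i%num_split)].append(item)
--     return alphadict
-- ===== SOURCE B (Python) =====
-- def alphalist_split(alphaslist, num_split = 3):
--     tmp_list = sorted(alphaslist)
--     alphadict = dict()
--     for j in range(num_split):
--         alphadict["split%d" % j] = tmp_list[j::num_split]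
--     return alphadict
-- ===== Notes on version B (the rewrite author's own statement) =====
-- stated objective: idiomatic
-- what changed: A distributes the sorted list in one enumerate pass appending element i to bucket i % num_split; B instead builds each bucket directly as the strided slice tmp_list[j::num_split] inside the range(num_split) loop, so the element-distributing pass, the per-element modulo and the bucket-append bookkeeping disappear.
import Mathlib
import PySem

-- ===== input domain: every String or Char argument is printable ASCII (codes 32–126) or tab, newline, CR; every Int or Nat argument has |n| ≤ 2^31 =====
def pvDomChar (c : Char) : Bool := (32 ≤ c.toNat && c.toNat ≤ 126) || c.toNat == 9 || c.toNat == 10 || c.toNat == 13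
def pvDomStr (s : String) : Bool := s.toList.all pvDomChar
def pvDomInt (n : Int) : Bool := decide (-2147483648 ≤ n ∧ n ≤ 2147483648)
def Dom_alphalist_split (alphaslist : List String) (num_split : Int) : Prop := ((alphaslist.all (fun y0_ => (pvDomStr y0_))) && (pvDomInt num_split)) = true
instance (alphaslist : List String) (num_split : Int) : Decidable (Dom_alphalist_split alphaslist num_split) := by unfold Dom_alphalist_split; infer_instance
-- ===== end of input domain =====

-- B replaces A's single round-robin distributing pass (enumerate + i % num_split append)
-- by num_split strided slices tmp_list[j::num_split] of the sorted list (objective: idiomatic).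

-- ===== PORT A =====
-- Python A: sort, pre-create buckets "split0".."split{k-1}" mapped to [], then append each
-- sorted element to bucket i % num_split.  The append `alphadict[key].append(item)` is ported
-- as Dict.modify; under Pre_ the key always exists, so this is exact (outside Pre_ Python raises).
def alphalist_split (alphaslist : List String) (num_split : Int) : List (String × List String) :=
  let tmp_list := PySem.List.sorted alphaslist (fun x => x) false
  let d0 : PySem.Dict String (List String) :=
    (PySem.List.pyRange 0 num_split 1).foldl
      (fun d i => d.insert ("split" ++ PySem.Int.toStr i) []) PySem.Dict.empty
  let d1 := (PySem.List.enumerate tmp_list 0).foldl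
      (fun d p => d.modify ("split" ++ PySem.Int.toStr (PySem.Int.mod p.1 num_split)) []
        (fun v => v ++ [p.2])) d0
  d1.items

-- ===== PORT B =====
-- Python B: sort, then for j in range(num_split) assign bucket j := tmp_list[j::num_split].
-- Whenever the loop body runs, num_split ≥ 1, so the slice step is nonzero and slice? is `some`;
-- `.getD []` only discharges the Option and is never the value taken.
def alphalist_split_alt (alphaslist : List String) (num_split : Int) : List (String × List String) :=
  let tmp_list := PySem.List.sorted alphaslist (fun x => x) false
  ((PySem.List.pyRange 0 num_split 1).foldl
      (fun d j => d.insert ("split" ++ PySem.Int.toStr j)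
        ((PySem.List.slice? tmp_list (some j) none num_split).getD [])) PySem.Dict.empty).items

-- ===== PRECONDITION & SPEC =====
-- Pre_ excludes exactly the inputs where Python A raises: num_split ≤ 0 with a nonempty list
-- (ZeroDivisionError for num_split = 0, KeyError for negative num_split).
def Pre_alphalist_split (alphaslist : List String) (num_split : Int) : Prop :=
  0 < num_split ∨ alphaslist = []
instance (alphaslist : List String) (num_split : Int) : Decidable (Pre_alphalist_split alphaslist num_split) := by unfold Pre_alphalist_split; infer_instance
def pvWitness_alphalist_split : List String × Int := (["b", "a", "c", "a"], 2)

def Spec_alphalist_split (alphaslist : List String) (num_split : Int) (out : List (String × List String)) : Prop := out = alphalist_split_alt alphaslist num_split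
instance (alphaslist : List String) (num_split : Int) (out : List (String × List String)) : Decidable (Spec_alphalist_split alphaslist num_split out) := by unfold Spec_alphalist_split; infer_instance

-- ===== CLAIM (what is proved, stated in full; the proofs are below) =====
def Claim_equal_alphalist_split : Prop := ∀ (alphaslist : List String) (num_split : Int), Dom_alphalist_split alphaslist num_split → Pre_alphalist_split alphaslist num_split → Spec_alphalist_split alphaslist num_split (alphalist_split alphaslist num_split)

-- ===== LEMMAS AND PROOFS =====

-- `pvPick st l j` = the elements of `l` at indices j, j+(st+1), j+2(st+1), …
-- (the common value of A's bucket j and B's slice l[j::st+1]).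
def pvPick {α : Type} (st : Nat) (l : List α) (j : Nat) : List α :=
  match h : l[j]? with
  | none => []
  | some x => x :: pvPick st (l.drop (st + 1)) j
termination_by l.length
decreasing_by
  have hj : j < l.length := by
    by_contra hc
    simp [List.getElem?_eq_none (Nat.le_of_not_lt hc)] at h
  simp only [List.length_drop]
  omega

theorem pvPick_none {α : Type} {st : Nat} {l : List α} {j : Nat} (h : l[j]? = none) :
    pvPick st l j = [] := by
  rw [pvPick, h]

theorem pvPick_some {α : Type} {st : Nat} {l : List α} {j : Nat} {x : α} (h : l[j]? = some x) :
    pvPick st l j = x :: pvPick st (l.drop (st + 1)) j := by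
  rw [pvPick, h]

theorem pvPick_nil {α : Type} (st j : Nat) : pvPick st ([] : List α) j = [] :=
  pvPick_none (by simp)

theorem pvPick_drop_aux {α : Type} (st : Nat) :
    ∀ (n : Nat) (l : List α), l.length ≤ n → ∀ (m j : Nat),
      pvPick st (l.drop m) j = pvPick st l (m + j) := by
  intro n
  induction n with
  | zero =>
    intro l hl m j
    have : l = [] := List.eq_nil_of_length_eq_zero (Nat.le_zero.mp hl)
    subst this; simp [pvPick_nil]
  | succ n ih =>
    intro l hl m j
    cases h : (l.drop m)[j]? with
    | none =>
      rw [pvPick_none h]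
      rw [List.getElem?_drop] at h
      rw [pvPick_none h]
    | some x =>
      rw [pvPick_some h]
      have h' : l[m + j]? = some x := by rwa [List.getElem?_drop] at h
      rw [pvPick_some h']
      have hlen : m + j < l.length := by
        by_contra hc
        simp [List.getElem?_eq_none (Nat.le_of_not_lt hc)] at h'
      have hrw : (l.drop m).drop (st + 1) = (l.drop (st + 1)).drop m := by
        rw [List.drop_drop, List.drop_drop, Nat.add_comm]
      rw [hrw, ih (l.drop (st + 1)) (by simp [List.length_drop]; omega) m j]

theorem pvPick_drop {α : Type} (st : Nat) (l : List α) (m j : Nat) :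
    pvPick st (l.drop m) j = pvPick st l (m + j) :=
  pvPick_drop_aux st l.length l (Nat.le_refl _) m j

theorem pvPick_cons {α : Type} (st : Nat) (x : α) (t : List α) {o : Nat} (ho : 0 < o) :
    pvPick st (x :: t) o = pvPick st t (o - 1) := by
  have := pvPick_drop st (x :: t) 1 (o - 1)
  simp only [List.drop_one, List.tail_cons] at this
  rw [this]
  congr 1
  omega

-- ===== A's bucket: the filtered enumerate pass is pvPick =====
theorem pvSubOne (k a : Int) (hk : 0 < k) :
    (a - 1) % k = if a % k = 0 then k - 1 else a % k - 1 := by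
  have hr0 : 0 ≤ a % k := Int.emod_nonneg _ (by omega)
  have hrk : a % k < k := Int.emod_lt_of_pos _ hk
  rcases eq_or_lt_of_le (by omega : (1 : Int) ≤ k) with h1 | h1
  · have hk1 : k = 1 := h1.symm
    subst hk1
    simp
  · have hone : (1 : Int) % k = 1 := Int.emod_eq_of_lt (by omega) h1
    rw [Int.sub_emod, hone]
    by_cases hz : a % k = 0
    · rw [hz, if_pos rfl]
      have hneg : (-1 : Int) % k = k - 1 := by
        have e1 : ((-1 : Int) + k * 1) % k = (-1 : Int) % k := Int.add_mul_emod_self_left (-1) k 1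
        have e2 : ((-1 : Int) + k * 1) = k - 1 := by ring
        rw [e2] at e1
        rw [← e1, Int.emod_eq_of_lt (by omega) (by omega)]
      simpa using hneg
    · rw [if_neg hz, Int.emod_eq_of_lt (by omega) (by omega)]

theorem pvFside {α : Type} (k : Int) (hk : 0 < k) :
    ∀ (l : List α) (s j : Int), 0 ≤ s → 0 ≤ j → j < k →
      ((PySem.List.enumerate l s).filter (fun p => PySem.Int.mod p.1 k == j)).map (fun p => p.2)
        = pvPick (k.toNat - 1) l (((j - s) % k).toNat) := by
  intro l
  induction l with
  | nil => intro s j _ _ _; simp [PySem.List.enumerate_nil, pvPick_nil]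
  | cons x t ih =>
    intro s j hs hj hjk
    rw [PySem.List.enumerate_cons, List.filter_cons]
    have hmod : PySem.Int.mod s k = s % k := PySem.Int.mod_eq_emod_of_pos hk
    have hjj : j % k = j := Int.emod_eq_of_lt hj hjk
    have hsub : (j - s) % k = (j - s % k) % k := by
      rw [Int.sub_emod, hjj]
    have hr0 : 0 ≤ (j - s) % k := Int.emod_nonneg _ (by omega)
    have hrk : (j - s) % k < k := Int.emod_lt_of_pos _ hk
    have hshift : j - (s + 1) = (j - s) - 1 := by ring
    have hstep : (j - (s + 1)) % k = if (j - s) % k = 0 then k - 1 else (j - s) % k - 1 := by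
      rw [hshift]; exact pvSubOne k (j - s) hk
    have ih' := ih (s + 1) j (by omega) hj hjk
    by_cases hc : s % k = j
    · have hz : (j - s) % k = 0 := by
        rw [hsub, hc]; simp
      have hcond : (PySem.Int.mod s k == j) = true := by simp [hmod, hc]
      rw [hcond]
      simp only [if_true, List.map_cons]
      rw [show ((j - s) % k).toNat = 0 by omega]
      have hx : (x :: t)[0]? = some x := by simp
      rw [pvPick_some hx]
      have hdrop : (x :: t).drop (k.toNat - 1 + 1) = t.drop (k.toNat - 1) := by
        rw [show k.toNat - 1 + 1 = (k.toNat - 1) + 1 from rfl, List.drop_succ_cons]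
      rw [hdrop, pvPick_drop]
      rw [hstep, if_pos hz] at ih'
      rw [show (k - 1).toNat = k.toNat - 1 + 0 by omega] at ih'
      rw [ih']
    · have hz : (j - s) % k ≠ 0 := by
        intro h0
        rw [hsub] at h0
        have hsk0 : 0 ≤ s % k := Int.emod_nonneg _ (by omega)
        have hsk1 : s % k < k := Int.emod_lt_of_pos _ hk
        by_cases hns : 0 ≤ j - s % k
        · rw [Int.emod_eq_of_lt hns (by omega)] at h0
          omega
        · have e1 : (j - s % k + k * 1) % k = (j - s % k) % k :=
            Int.add_mul_emod_self_left (j - s % k) k 1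
          rw [← e1, Int.emod_eq_of_lt (by omega) (by omega)] at h0
          omega
      have hcond : (PySem.Int.mod s k == j) = false := by simp [hmod, hc]
      rw [hcond]
      simp only [Bool.false_eq_true, if_false]
      have hpos : 0 < (j - s) % k := lt_of_le_of_ne hr0 (Ne.symm hz)
      rw [pvPick_cons _ _ _ (by omega : 0 < ((j - s) % k).toNat)]
      rw [hstep, if_neg hz] at ih'
      rw [show ((j - s) % k - 1).toNat = ((j - s) % k).toNat - 1 by omega] at ih'
      exact ih'

-- ===== B's bucket: the strided slice is pvPick =====
theorem pvStride {α : Type} (k : Nat) (hk : 0 < k) :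
    ∀ (c : Nat) (l : List α) (j : Nat), c = (l.length - j + k - 1) / k →
      (List.range c).filterMap (fun i => l[j + k * i]?) = pvPick (k - 1) l j := by
  intro c
  induction c with
  | zero =>
    intro l j hc
    have hlen : l.length ≤ j := by
      by_contra hlt
      have h1 : l.length - j + k - 1 = (l.length - j - 1) + k := by omega
      rw [h1, Nat.add_div_right _ hk] at hc
      exact Nat.succ_ne_zero _ hc.symm
    simp [List.range_zero, pvPick_none (List.getElem?_eq_none hlen)]
  | succ c ih =>
    intro l j hc
    have hjlen : j < l.length := by
      by_contra hge
      have h1 : l.length - j = 0 := by omega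
      rw [h1, Nat.div_eq_of_lt (by omega)] at hc
      omega
    have hA : l.length - j + k - 1 = (l.length - j - 1) + k := by omega
    rw [hA, Nat.add_div_right _ hk] at hc
    have hcA : c = (l.length - j - 1) / k := by omega
    rw [List.range_succ_eq_map, List.filterMap_cons]
    have h0 : l[j + k * 0]? = some l[j] := by
      simp [List.getElem?_eq_getElem hjlen]
    rw [h0]
    dsimp only
    rw [List.filterMap_map]
    simp only [Function.comp_def]
    have hfun : ∀ i ∈ List.range c,
        l[j + k * (Nat.succ i)]? = (fun i => (l.drop k)[j + k * i]?) i := by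
      intro i _
      simp only [List.getElem?_drop]
      congr 1
      rw [Nat.mul_succ]
      omega
    rw [List.filterMap_congr hfun]
    have hcnt : c = ((l.drop k).length - j + k - 1) / k := by
      rw [List.length_drop]
      by_cases hkl : k + j < l.length
      · have : l.length - k - j + k - 1 = (l.length - j - 1 - k) + k := by omega
        rw [this, Nat.add_div_right _ hk, hcA]
        have : l.length - j - 1 = (l.length - j - 1 - k) + k := by omega
        rw [this, Nat.add_div_right _ hk]
        rw [Nat.add_sub_cancel]
      · have h2 : l.length - k - j + k - 1 < k := by omega
        rw [Nat.div_eq_of_lt h2, hcA, Nat.div_eq_of_lt (by omega)]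
    rw [ih (l.drop k) j hcnt]
    have hget : l[j]? = some l[j] := List.getElem?_eq_getElem hjlen
    rw [pvPick_some hget, show k - 1 + 1 = k by omega]

theorem pvBside {α : Type} (l : List α) (j k : Int) (hj : 0 ≤ j) (hk : 0 < k) :
    PySem.List.slice? l (some j) none k = some (pvPick (k.toNat - 1) l j.toNat) := by
  have hk0 : ¬ k = 0 := by omega
  have hkneg : ¬ k < 0 := by omega
  have hjneg : ¬ j < 0 := by omega
  simp only [PySem.List.slice?, PySem.List.sliceIndices, if_neg hk0, if_neg hkneg,
    if_neg hjneg, if_pos hk]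
  by_cases hjl : j < (l.length : Int)
  · have hmin : min j (l.length : Int) = j := min_eq_left (le_of_lt hjl)
    rw [hmin, if_pos hjl]
    obtain ⟨J, hJ⟩ : ∃ J : Nat, (J : Int) = j := ⟨j.toNat, Int.toNat_of_nonneg hj⟩
    obtain ⟨K, hK⟩ : ∃ K : Nat, (K : Int) = k := ⟨k.toNat, Int.toNat_of_nonneg (by omega)⟩
    subst hJ hK
    have hK0 : 0 < K := by omega
    simp only [Int.toNat_natCast]
    congr 1
    have hcnt : (((l.length : Int) - J + K - 1) / (K : Int)).toNat
        = (l.length - J + K - 1) / K := by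
      rw [show ((l.length : Int) - J + K - 1) = ((l.length - J + K - 1 : Nat) : Int) by omega,
        ← Int.natCast_ediv, Int.toNat_natCast]
    rw [hcnt]
    have hfun : ∀ i ∈ List.range ((l.length - J + K - 1) / K),
        l[((J : Int) + K * (i : Int)).toNat]? = (fun i => l[J + K * i]?) i := by
      intro i _
      congr 1
    rw [List.filterMap_congr hfun]
    exact pvStride K hK0 _ l J rfl
  · have hmin : min j (l.length : Int) = (l.length : Int) := min_eq_right (by omega)
    rw [hmin, if_neg (lt_irrefl _)]
    simp only [List.range_zero, List.filterMap_nil]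
    congr 1
    rw [pvPick_none (List.getElem?_eq_none (by omega : l.length ≤ j.toNat))]

-- ===== decimal digits are injective (distinct bucket keys) =====
def pvEval (ds : List Char) : Nat := ds.foldl (fun a c => 10 * a + (c.toNat - 48)) 0

theorem pvTdc_append (b f : Nat) : ∀ (n : Nat) (acc : List Char),
    Nat.toDigitsCore b f n acc = Nat.toDigitsCore b f n [] ++ acc := by
  induction f with
  | zero => intro n acc; simp [Nat.toDigitsCore]
  | succ f ih =>
    intro n acc
    simp only [Nat.toDigitsCore]
    by_cases h : n / b = 0
    · simp [h]
    · simp only [h, if_false]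
      rw [ih (n / b) ((n % b).digitChar :: acc), ih (n / b) [(n % b).digitChar]]
      simp

theorem pvTdc_fuel : ∀ (n : Nat), ∀ (f f' : Nat), n < f → n < f' → ∀ (acc : List Char),
    Nat.toDigitsCore 10 f n acc = Nat.toDigitsCore 10 f' n acc := by
  intro n
  induction n using Nat.strong_induction_on with
  | _ n ih =>
    intro f f' hf hf' acc
    cases f with
    | zero => omega
    | succ g =>
      cases f' with
      | zero => omega
      | succ g' =>
        simp only [Nat.toDigitsCore]
        by_cases h : n / 10 = 0
        · simp [h]
        · simp only [h, if_false]
          have hlt : n / 10 < n := Nat.div_lt_self (by omega) (by omega)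
          exact ih (n / 10) hlt g g' (by omega) (by omega) _

theorem pvToDigits_small (n : Nat) (h : n < 10) : Nat.toDigits 10 n = [Nat.digitChar n] := by
  simp only [Nat.toDigits, Nat.toDigitsCore]
  rw [Nat.div_eq_of_lt h, Nat.mod_eq_of_lt h]
  simp

theorem pvToDigits_step (n : Nat) (h : 10 ≤ n) :
    Nat.toDigits 10 n = Nat.toDigits 10 (n / 10) ++ [Nat.digitChar (n % 10)] := by
  have hne : n / 10 ≠ 0 := by
    have := Nat.div_le_div_right (c := 10) h
    simp at this; omega
  simp only [Nat.toDigits, Nat.toDigitsCore]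
  simp only [hne, if_false]
  rw [pvTdc_append 10 n (n / 10) [(n % 10).digitChar]]
  congr 1
  have hlt : n / 10 < n := Nat.div_lt_self (by omega) (by omega)
  exact pvTdc_fuel (n / 10) n (n / 10 + 1) hlt (by omega) []

theorem pvEval_append (xs : List Char) (c : Char) :
    pvEval (xs ++ [c]) = 10 * pvEval xs + (c.toNat - 48) := by
  simp [pvEval, List.foldl_append]

theorem pvEval_toDigits : ∀ (n : Nat), pvEval (Nat.toDigits 10 n) = n := by
  intro n
  induction n using Nat.strong_induction_on with
  | _ n ih =>
    by_cases h : n < 10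
    · rw [pvToDigits_small n h]
      interval_cases n <;> decide
    · push_neg at h
      rw [pvToDigits_step n h, pvEval_append]
      have hlt : n / 10 < n := Nat.div_lt_self (by omega) (by omega)
      rw [ih (n / 10) hlt]
      have hm : n % 10 < 10 := Nat.mod_lt _ (by omega)
      have hd : (Nat.digitChar (n % 10)).toNat - 48 = n % 10 := by
        set m := n % 10 with hmm
        interval_cases m <;> decide
      rw [hd]
      omega

theorem pvToDigits_inj {a b : Nat} (h : Nat.toDigits 10 a = Nat.toDigits 10 b) : a = b := by
  have := congrArg pvEval h
  rwa [pvEval_toDigits, pvEval_toDigits] at this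

theorem pvK_inj {a b : Int} (ha : 0 ≤ a) (hb : 0 ≤ b)
    (h : "split" ++ PySem.Int.toStr a = "split" ++ PySem.Int.toStr b) : a = b := by
  have h1 := congrArg String.toList h
  rw [String.toList_append, String.toList_append] at h1
  have h2 : (PySem.Int.toStr a).toList = (PySem.Int.toStr b).toList :=
    List.append_cancel_left h1
  rw [PySem.Int.toList_toStr, PySem.Int.toList_toStr] at h2
  simp only [PySem.Int.toChars, if_neg (by omega : ¬ a < 0), if_neg (by omega : ¬ b < 0)] at h2
  have := pvToDigits_inj h2
  omega

-- ===== assembling the A side and the B side =====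
theorem pvKeys_foldl_modify (key : Int × String → String) :
    ∀ (L : List (Int × String)) (d : PySem.Dict String (List String)),
      (∀ p ∈ L, d.contains (key p) = true) →
      (L.foldl (fun d p => d.modify (key p) [] (fun v => v ++ [p.2])) d).keys = d.keys := by
  intro L
  induction L with
  | nil => intro d _; rfl
  | cons p t ih =>
    intro d hall
    have hp : d.contains (key p) = true := hall p (List.mem_cons_self)
    have hkeys : (d.modify (key p) [] (fun v => v ++ [p.2])).keys = d.keys := by
      rw [PySem.Dict.keys_modify, PySem.Dict.keys_insert_of_contains d _ hp]
    rw [List.foldl_cons]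
    rw [ih (d.modify (key p) [] (fun v => v ++ [p.2]))
      (fun q hq => by
        rw [PySem.Dict.contains_iff_mem_keys, hkeys, ← PySem.Dict.contains_iff_mem_keys]
        exact hall q (List.mem_cons_of_mem _ hq))]
    exact hkeys

-- abbreviation used only in the proofs below
theorem pvResidue_mem {p : Int × String} {tmp : List String} {k : Int} (hk : 0 < k)
    (hp : p ∈ PySem.List.enumerate tmp 0) :
    0 ≤ PySem.Int.mod p.1 k ∧ PySem.Int.mod p.1 k < k ∧ 0 ≤ p.1 := by
  rcases (PySem.List.mem_enumerate_iff _ _ _).mp hp with ⟨i, hi, rfl⟩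
  rw [PySem.Int.mod_eq_emod_of_pos hk]
  refine ⟨Int.emod_nonneg _ (by omega), Int.emod_lt_of_pos _ hk, by simp⟩

theorem pvKmap_nodup (k : Int) :
    ((PySem.List.pyRange 0 k 1).map (fun j => "split" ++ PySem.Int.toStr j)).Nodup := by
  refine List.Nodup.map_on ?_ (PySem.List.nodup_pyRange_one 0 k)
  intro x hx y hy hxy
  rcases PySem.List.mem_pyRange_one.mp hx with ⟨hx0, _⟩
  rcases PySem.List.mem_pyRange_one.mp hy with ⟨hy0, _⟩
  exact pvK_inj hx0 hy0 hxy

theorem pvA_items (l : List String) (k : Int) (hk : 0 < k) :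
    alphalist_split l k = (PySem.List.pyRange 0 k 1).map (fun j =>
      ("split" ++ PySem.Int.toStr j,
        pvPick (k.toNat - 1) (PySem.List.sorted l (fun x => x) false) j.toNat)) := by
  simp only [alphalist_split]
  set tmp := PySem.List.sorted l (fun x => x) false with htmp
  set L := PySem.List.enumerate tmp 0 with hL
  set d0 : PySem.Dict String (List String) :=
    (PySem.List.pyRange 0 k 1).foldl
      (fun d i => d.insert ("split" ++ PySem.Int.toStr i) []) PySem.Dict.empty with hd0
  have hd0items : d0.items
      = (PySem.List.pyRange 0 k 1).map (fun i => ("split" ++ PySem.Int.toStr i, ([] : List String))) := by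
    rw [hd0, PySem.Dict.items_foldl_insert_fresh (PySem.List.pyRange 0 k 1)
      (fun i => "split" ++ PySem.Int.toStr i) (fun _ => ([] : List String)) PySem.Dict.empty
      (fun a _ => PySem.Dict.contains_empty _) (pvKmap_nodup k)]
    rfl
  have hd0keys : d0.keys = (PySem.List.pyRange 0 k 1).map (fun i => "split" ++ PySem.Int.toStr i) := by
    show d0.items.map Prod.fst = _
    rw [hd0items, List.map_map]
    rfl
  have hnodup0 : d0.keys.Nodup := by rw [hd0keys]; exact pvKmap_nodup k
  have hd0getD : ∀ j ∈ PySem.List.pyRange 0 k 1,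
      d0.getD ("split" ++ PySem.Int.toStr j) [] = [] := by
    intro j hj
    have hmem : ("split" ++ PySem.Int.toStr j, ([] : List String)) ∈ d0.items := by
      rw [hd0items]; exact List.mem_map.mpr ⟨j, hj, rfl⟩
    exact PySem.Dict.getD_of_mem_items d0 hmem hnodup0 []
  have hcont : ∀ p ∈ L, d0.contains ("split" ++ PySem.Int.toStr (PySem.Int.mod p.1 k)) = true := by
    intro p hp
    rcases pvResidue_mem hk hp with ⟨h1, h2, _⟩
    rw [PySem.Dict.contains_iff_mem_keys, hd0keys]
    exact List.mem_map.mpr ⟨PySem.Int.mod p.1 k, PySem.List.mem_pyRange_one.mpr ⟨h1, h2⟩, rfl⟩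
  set dA := L.foldl (fun d p =>
      d.modify ("split" ++ PySem.Int.toStr (PySem.Int.mod p.1 k)) [] (fun v => v ++ [p.2])) d0 with hdA
  have hkeys1 : dA.keys = d0.keys :=
    pvKeys_foldl_modify (fun p => "split" ++ PySem.Int.toStr (PySem.Int.mod p.1 k)) L d0 hcont
  have hnodup1 : dA.keys.Nodup :=
    PySem.Dict.nodup_keys_foldl_modify_key L
      (fun p => "split" ++ PySem.Int.toStr (PySem.Int.mod p.1 k)) []
      (fun _ p => fun v => v ++ [p.2]) d0 hnodup0
  rw [PySem.Dict.items_eq_map_keys dA hnodup1 []]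
  rw [hkeys1, hd0keys, List.map_map]
  apply List.map_congr_left
  intro j hj
  rcases PySem.List.mem_pyRange_one.mp hj with ⟨hj0, hjk⟩
  simp only [Function.comp]
  refine Prod.ext rfl ?_
  show dA.getD ("split" ++ PySem.Int.toStr j) [] = _
  have hfold : dA = (L.map (fun p => ("split" ++ PySem.Int.toStr (PySem.Int.mod p.1 k), p.2))).foldl
      (fun d q => d.modify q.1 [] (fun v => v ++ [q.2])) d0 := by
    rw [List.foldl_map]
  rw [hfold, PySem.Dict.getD_foldl_modify_append, hd0getD j hj, List.nil_append]
  rw [List.filter_map, List.map_map]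
  have hfc : ∀ p ∈ L,
      ((fun q => q.1 == ("split" ++ PySem.Int.toStr j)) ∘
        (fun p => ("split" ++ PySem.Int.toStr (PySem.Int.mod p.1 k), p.2))) p
      = (fun p => PySem.Int.mod p.1 k == j) p := by
    intro p hp
    rcases pvResidue_mem hk hp with ⟨h1, _, _⟩
    simp only [Function.comp]
    by_cases he : PySem.Int.mod p.1 k = j
    · simp [he]
    · have hne : ¬ ("split" ++ PySem.Int.toStr (PySem.Int.mod p.1 k)
          = "split" ++ PySem.Int.toStr j) := fun hh => he (pvK_inj h1 hj0 hh)
      simp [he, hne]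
  rw [List.filter_congr hfc]
  have := pvFside k hk tmp 0 j le_rfl hj0 hjk
  rw [show (j - 0) % k = j by rw [sub_zero]; exact Int.emod_eq_of_lt hj0 hjk] at this
  rw [hL]
  exact this

theorem pvB_items (l : List String) (k : Int) (hk : 0 < k) :
    alphalist_split_alt l k = (PySem.List.pyRange 0 k 1).map (fun j =>
      ("split" ++ PySem.Int.toStr j,
        pvPick (k.toNat - 1) (PySem.List.sorted l (fun x => x) false) j.toNat)) := by
  simp only [alphalist_split_alt]
  set tmp := PySem.List.sorted l (fun x => x) false with htmp
  rw [PySem.Dict.items_foldl_insert_fresh (PySem.List.pyRange 0 k 1)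
    (fun j => "split" ++ PySem.Int.toStr j)
    (fun j => (PySem.List.slice? tmp (some j) none k).getD []) PySem.Dict.empty
    (fun a _ => PySem.Dict.contains_empty _) (pvKmap_nodup k)]
  show (PySem.List.pyRange 0 k 1).map _ = _
  apply List.map_congr_left
  intro j hj
  rcases PySem.List.mem_pyRange_one.mp hj with ⟨hj0, _⟩
  rw [pvBside tmp j k hj0 hk]
  rfl

-- ===== VERDICT (by name: the statement is the Claim_ definition above) =====
theorem alphalist_split_spec : Claim_equal_alphalist_split := by
  intro l k _ hpre
  unfold Spec_alphalist_split
  rcases hpre with hk | hnil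
  · rw [pvA_items l k hk, pvB_items l k hk]
  · subst hnil
    by_cases hk : 0 < k
    · rw [pvA_items [] k hk, pvB_items [] k hk]
    · simp [alphalist_split, alphalist_split_alt,
        PySem.List.pyRange_one_eq_nil (by omega : k ≤ 0)]
      rfl
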